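-- pv_equiv track=rewrite | github.com/Orange2-invalide/Nick-Generator-v4.0 | GENa.py | category
-- ===== SOURCE A (Python) =====
-- def category(n):
--     cats = {
--         'Dark':   (['dark','bl4','sh4','d34','bl00','doom','shadow'],2),
--         'Cyber':  (['cyber','n30','l4s','pl4','qu4','turb'],2),
--         'Warrior':(['kill','war','slay','rage','fury','str3'],2),
--         'Leet':   (['4','3','1','0','7'],3),
--         'Beast':  (['wolf','bear','eagle','snak','tiger','drag'],1),
--         'Elite':  (['master','legend','god','royal','prime','alpha'],1),
--     }
--     sc = {cat:sum(1 for p in ps if p in n) for cat,(ps,th) in cats.items()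
--           if sum(1 for p in ps if p in n)>=th}
--     return max(sc,key=sc.get) if sc else 'Gamer'
-- ===== SOURCE B (Python) =====
-- def category(n):
--     cats = [
--         ('Dark',    ['dark','bl4','sh4','d34','bl00','doom','shadow'], 2),
--         ('Cyber',   ['cyber','n30','l4s','pl4','qu4','turb'], 2),
--         ('Warrior', ['kill','war','slay','rage','fury','str3'], 2),
--         ('Leet',    ['4','3','1','0','7'], 3),
--         ('Beast',   ['wolf','bear','eagle','snak','tiger','drag'], 1),
--         ('Elite',   ['master','legend','god','royal','prime','alpha'], 1),
--     ]
--     # multi-pattern scan: walk the suffixes of n once, collecting every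
--     # pattern that occurs as a prefix of some suffix (i.e. occurs in n)
--     pats = [p for _, ps, _ in cats for p in ps]
--     found = set()
--     s = n
--     while True:
--         for p in pats:
--             if s.startswith(p):
--                 found.add(p)
--         if not s:
--             break
--         s = s[1:]
--     # one pass over the categories keeping a running best
--     best = None
--     for cat, ps, th in cats:
--         score = len([p for p in ps if p in found])
--         if score >= th and (best is None or score > best[1]):
--             best = (cat, score)
--     return best[0] if best is not None else 'Gamer'
-- ===== Notes on version B (the rewrite author's own statement) =====
-- stated objective: alternative
-- what changed: Replaces per-pattern substring containment tests plus a filtered score-dict and max-by-key scan with a naive multi-pattern matcher: one walk over the suffixes of n collects every pattern occurring in n into a set, then a single pass over the categories tallies scores from that set and keeps a running best (strict > preserves max's first-key-wins tie-break).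
import Mathlib
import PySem

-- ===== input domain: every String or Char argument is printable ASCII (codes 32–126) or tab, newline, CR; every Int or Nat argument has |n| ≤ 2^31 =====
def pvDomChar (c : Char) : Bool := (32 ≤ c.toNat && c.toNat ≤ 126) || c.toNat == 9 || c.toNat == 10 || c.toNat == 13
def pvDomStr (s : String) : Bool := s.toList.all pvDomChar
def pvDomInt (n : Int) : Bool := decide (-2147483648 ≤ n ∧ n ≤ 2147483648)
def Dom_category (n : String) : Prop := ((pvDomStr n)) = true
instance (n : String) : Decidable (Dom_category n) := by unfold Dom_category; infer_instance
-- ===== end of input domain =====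

-- B is an alternative algorithm: one walk over the suffixes of n collects every pattern occurring
-- in n into a set (a naive multi-pattern matcher), then one tally pass keeps a running best;
-- A instead tests containment per pattern, builds a filtered score dict and scans it with max.

-- the fixed category table, shared verbatim by both Pythons
def pvCats : List (String × List String × Int) :=
  [("Dark",    (["dark","bl4","sh4","d34","bl00","doom","shadow"], 2)),
   ("Cyber",   (["cyber","n30","l4s","pl4","qu4","turb"], 2)),
   ("Warrior", (["kill","war","slay","rage","fury","str3"], 2)),
   ("Leet",    (["4","3","1","0","7"], 3)),
   ("Beast",   (["wolf","bear","eagle","snak","tiger","drag"], 1)),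
   ("Elite",   (["master","legend","god","royal","prime","alpha"], 1))]

-- ===== PORT A =====
-- sum(1 for p in ps if p in n)
def pvScore (n : String) (ps : List String) : Int :=
  ps.foldl (fun acc p => if PySem.Str.isIn p n then acc + 1 else acc) 0

-- sc = {cat: score for cat,(ps,th) in cats.items() if score >= th}; max(sc, key=sc.get) if sc else 'Gamer'
def category (n : String) : String :=
  let sc : PySem.Dict String Int :=
    pvCats.foldl
      (fun d cpt =>
        if pvScore n cpt.2.1 ≥ cpt.2.2 then d.insert cpt.1 (pvScore n cpt.2.1) else d)
      PySem.Dict.empty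
  match PySem.List.max? sc.keys (fun c => sc.getD c 0) with
  | some c => c
  | none => "Gamer"

-- ===== PORT B =====
-- while True: for p in pats: if s.startswith(p): found.add(p); if not s: break; s = s[1:]
def pvScan (pats : List String) (s : List Char) (found : PySem.Set String) : PySem.Set String :=
  let f2 := pats.foldl
    (fun f p => if PySem.Chars.startswith s p.toList then PySem.Set.add f p else f) found
  match s with
  | [] => f2
  | _ :: t => pvScan pats t f2

def category_alt (n : String) : String :=
  -- pats = [p for _, ps, _ in cats for p in ps]
  let pats := pvCats.flatMap (fun cpt => cpt.2.1)
  let found := pvScan pats n.toList PySem.Set.empty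
  -- best = None; for cat, ps, th in cats: score = len([p for p in ps if p in found]); ...
  let best : Option (String × Int) :=
    pvCats.foldl
      (fun acc cpt =>
        let s : Int := ((cpt.2.1.filter (fun p => PySem.Set.contains found p)).length : Int)
        match acc with
        | none => if s ≥ cpt.2.2 then some (cpt.1, s) else none
        | some b => if s ≥ cpt.2.2 ∧ b.2 < s then some (cpt.1, s) else some b)
      none
  match best with
  | some b => b.1
  | none => "Gamer"

-- ===== PRECONDITION & SPEC =====
def Spec_category (n : String) (out : String) : Prop := out = category_alt n
instance (n : String) (out : String) : Decidable (Spec_category n out) := by unfold Spec_category; infer_instance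

-- ===== CLAIM =====
def Claim_equal_category : Prop := ∀ (n : String), Dom_category n → Spec_category n (category n)

-- ===== LEMMAS AND PROOFS =====

-- the qualified (category, score) pairs in table order
def pvQual (n : String) (l : List (String × List String × Int)) : List (String × Int) :=
  l.filterMap (fun cpt =>
    if pvScore n cpt.2.1 ≥ cpt.2.2 then some (cpt.1, pvScore n cpt.2.1) else none)

-- the "keep first strict maximum" step both sides reduce to
def pvStepM (acc : Option (String × Int)) (p : String × Int) : Option (String × Int) :=
  match acc with
  | none => some p
  | some b => if b.2 < p.2 then some p else some b

-- membership in the inner per-suffix fold of pvScan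
lemma pvFoldAddMem (c : String → Bool) (pats : List String) (f : PySem.Set String) (p : String) :
    p ∈ pats.foldl (fun f q => if c q then PySem.Set.add f q else f) f
      ↔ p ∈ f ∨ (p ∈ pats ∧ c p = true) := by
  induction pats generalizing f with
  | nil => simp
  | cons a t ih =>
    rw [List.foldl_cons, ih]
    by_cases h : c a = true
    · simp only [h, if_pos, PySem.Set.mem_add]
      constructor
      · rintro (⟨hf | he⟩ | ⟨ht, hc⟩)
        · exact Or.inl hf
        · exact Or.inr ⟨by simp [he], he ▸ h⟩
        · exact Or.inr ⟨List.mem_cons_of_mem _ ht, hc⟩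
      · rintro (hf | ⟨hm, hc⟩)
        · exact Or.inl (Or.inl hf)
        · rcases List.mem_cons.mp hm with he | ht
          · exact Or.inl (Or.inr he)
          · exact Or.inr ⟨ht, hc⟩
    · simp only [h]
      constructor
      · rintro (hf | ⟨ht, hc⟩)
        · exact Or.inl hf
        · exact Or.inr ⟨List.mem_cons_of_mem _ ht, hc⟩
      · rintro (hf | ⟨hm, hc⟩)
        · exact Or.inl hf
        · rcases List.mem_cons.mp hm with he | ht
          · exact absurd (he ▸ hc) (by simp [h])
          · exact Or.inr ⟨ht, hc⟩

-- characterisation of the suffix scan: a pattern lands in the set iff it is a prefix of some suffix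
lemma pvScanMem (pats : List String) (s : List Char) (f : PySem.Set String) (p : String) :
    p ∈ pvScan pats s f ↔ p ∈ f ∨ (p ∈ pats ∧ ∃ j, p.toList <+: s.drop j) := by
  induction s generalizing f with
  | nil =>
    rw [pvScan, pvFoldAddMem]
    constructor
    · rintro (hf | ⟨hm, hc⟩)
      · exact Or.inl hf
      · exact Or.inr ⟨hm, 0, by simpa using (PySem.Chars.startswith_iff _ _).mp hc⟩
    · rintro (hf | ⟨hm, j, hj⟩)
      · exact Or.inl hf
      · exact Or.inr ⟨hm, (PySem.Chars.startswith_iff _ _).mpr (by simpa using hj)⟩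
  | cons a t ih =>
    have hstep : pvScan pats (a :: t) f
        = pvScan pats t (pats.foldl
            (fun f p => if PySem.Chars.startswith (a :: t) p.toList then PySem.Set.add f p else f) f) := by
      rw [pvScan]
    rw [hstep, ih, pvFoldAddMem]
    constructor
    · rintro (⟨hf | ⟨hm, hc⟩⟩ | ⟨hm, j, hj⟩)
      · exact Or.inl hf
      · exact Or.inr ⟨hm, 0, by simpa using (PySem.Chars.startswith_iff _ _).mp hc⟩
      · exact Or.inr ⟨hm, j + 1, by simpa using hj⟩
    · rintro (hf | ⟨hm, j, hj⟩)
      · exact Or.inl (Or.inl hf)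
      · cases j with
        | zero => exact Or.inl (Or.inr ⟨hm, (PySem.Chars.startswith_iff _ _).mpr (by simpa using hj)⟩)
        | succ j => exact Or.inr ⟨hm, j, by simpa using hj⟩

-- on patterns of the flat list, the scanned set's membership test IS Python's 'p in n'
lemma pvScanContains (n : String) (p : String)
    (hp : p ∈ pvCats.flatMap (fun cpt => cpt.2.1)) :
    PySem.Set.contains (pvScan (pvCats.flatMap (fun cpt => cpt.2.1)) n.toList PySem.Set.empty) p
      = PySem.Str.isIn p n := by
  rw [Bool.eq_iff_iff]
  rw [PySem.Set.contains_iff, pvScanMem]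
  have hisin : PySem.Str.isIn p n = PySem.Chars.isIn p.toList n.toList := by
    simp [PySem.Str.isIn_eq]
  rw [hisin, ← PySem.Chars.exists_prefix_drop_iff_isIn]
  constructor
  · rintro (hf | ⟨_, hj⟩)
    · simp [PySem.Set.empty] at hf
    · exact hj
  · exact fun hj => Or.inr ⟨hp, hj⟩

-- pvScore as a filter length
lemma pvScoreFold (n : String) (ps : List String) (i : Int) :
    ps.foldl (fun acc p => if PySem.Str.isIn p n then acc + 1 else acc) i
      = i + ((ps.filter (fun p => PySem.Str.isIn p n)).length : Int) := by
  induction ps generalizing i with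
  | nil => simp
  | cons p t ih =>
    rw [List.foldl_cons, List.filter_cons]
    by_cases h : PySem.Str.isIn p n = true
    · rw [if_pos h, if_pos h, ih, List.length_cons]
      push_cast
      omega
    · rw [if_neg h, if_neg h, ih]

lemma pvScoreEq (n : String) (ps : List String) :
    pvScore n ps = ((ps.filter (fun p => PySem.Str.isIn p n)).length : Int) := by
  simpa using pvScoreFold n ps 0

-- B's per-category score equals A's per-category score
lemma pvScoreB (n : String) (found : PySem.Set String)
    (hfound : ∀ p ∈ pvCats.flatMap (fun c => c.2.1), found.contains p = PySem.Str.isIn p n)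
    (cpt : String × List String × Int) (hc : cpt ∈ pvCats) :
    (((cpt.2.1.filter (fun p => PySem.Set.contains found p)).length : Int))
      = pvScore n cpt.2.1 := by
  rw [pvScoreEq]
  congr 1
  refine congrArg _ (List.filter_congr ?_)
  intro p hp
  exact hfound p (List.mem_flatMap.mpr ⟨cpt, hc, hp⟩)

-- B's running-best fold over qualified pairs
lemma pvFoldB (n : String) (l : List (String × List String × Int))
    (acc : Option (String × Int)) :
    l.foldl
      (fun acc cpt =>
        let s := pvScore n cpt.2.1
        match acc with
        | none => if s ≥ cpt.2.2 then some (cpt.1, s) else none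
        | some b => if s ≥ cpt.2.2 ∧ b.2 < s then some (cpt.1, s) else some b)
      acc
    = (pvQual n l).foldl pvStepM acc := by
  induction l generalizing acc with
  | nil => rfl
  | cons cpt t ih =>
    rw [List.foldl_cons, ih]
    by_cases h : pvScore n cpt.2.1 ≥ cpt.2.2
    · have hq : pvQual n (cpt :: t) = (cpt.1, pvScore n cpt.2.1) :: pvQual n t := by
        simp [pvQual, h]
      rw [hq, List.foldl_cons]
      congr 1
      cases acc with
      | none => simp [pvStepM, h]
      | some b => by_cases hb : b.2 < pvScore n cpt.2.1 <;> simp [pvStepM, h, hb]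
    · have hq : pvQual n (cpt :: t) = pvQual n t := by
        simp [pvQual, h]
      rw [hq]
      congr 1
      cases acc with
      | none => simp [h]
      | some b => simp [h]

lemma pvDictItems (n : String) (l : List (String × List String × Int))
    (d : PySem.Dict String Int)
    (hdisj : ∀ cpt ∈ l, d.contains cpt.1 = false)
    (hl : (l.map (fun cpt => cpt.1)).Nodup) :
    (l.foldl
      (fun d cpt =>
        if pvScore n cpt.2.1 ≥ cpt.2.2 then d.insert cpt.1 (pvScore n cpt.2.1) else d)
      d).items
    = d.items ++ pvQual n l := by
  induction l generalizing d with
  | nil => simp [pvQual]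
  | cons cpt t ih =>
    simp only [List.map_cons, List.nodup_cons] at hl
    have hc : d.contains cpt.1 = false := hdisj cpt (List.mem_cons_self)
    simp only [List.foldl_cons, pvQual, List.filterMap_cons]
    by_cases h : pvScore n cpt.2.1 ≥ cpt.2.2
    · simp only [h, if_pos]
      rw [ih]
      · rw [PySem.Dict.items_insert_of_not_contains d (pvScore n cpt.2.1) hc]
        simp [pvQual]
      · intro c hcmem
        rw [PySem.Dict.contains_insert]
        have : c.1 ≠ cpt.1 := by
          intro he
          exact hl.1 (he ▸ (List.mem_map_of_mem hcmem))
        simp [this, hdisj c (List.mem_cons_of_mem _ hcmem)]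
      · exact hl.2
    · simp only [h]
      rw [ih]
      · rfl
      · exact fun c hc' => hdisj c (List.mem_cons_of_mem _ hc')
      · exact hl.2

lemma pvQualSublist (n : String) (l : List (String × List String × Int)) :
    ((pvQual n l).map (fun p => p.1)).Sublist (l.map (fun cpt => cpt.1)) := by
  induction l with
  | nil => simp [pvQual]
  | cons cpt t ih =>
    simp only [pvQual, List.filterMap_cons, List.map_cons]
    by_cases h : pvScore n cpt.2.1 ≥ cpt.2.2
    · simp only [h, if_pos, List.map_cons]
      exact (ih).cons₂ _
    · simp only [h]
      exact (ih).cons _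

lemma pvMaxFold (k : String → Int) (q : List (String × Int))
    (hq : ∀ p ∈ q, k p.1 = p.2)
    (accB : Option (String × Int)) (hacc : ∀ b ∈ accB, k b.1 = b.2) :
    q.foldl
      (fun acc c =>
        match acc with
        | none => some c.1
        | some m => if k m < k c.1 then some c.1 else some m)
      (accB.map (fun p => p.1))
    = (q.foldl pvStepM accB).map (fun p => p.1) := by
  induction q generalizing accB with
  | nil => rfl
  | cons p t ih =>
    have hqt : ∀ p' ∈ t, k p'.1 = p'.2 :=
      fun p' hp' => hq p' (List.mem_cons_of_mem _ hp')
    have hkp : k p.1 = p.2 := hq p List.mem_cons_self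
    have hp_acc : ∀ b ∈ (some p), k b.1 = b.2 := by
      intro b hb
      simp only [Option.mem_def, Option.some.injEq] at hb
      subst hb; exact hkp
    cases accB with
    | none =>
      simpa [pvStepM] using ih hqt (some p) hp_acc
    | some b =>
      have hkb : k b.1 = b.2 := hacc b rfl
      simp only [List.foldl_cons, Option.map_some, hkb, hkp, pvStepM]
      by_cases hlt : b.2 < p.2
      · simp only [hlt, if_pos]
        simpa using ih hqt (some p) hp_acc
      · simp only [hlt, if_false]
        simpa using ih hqt (some b) hacc

lemma pvA_max (n : String) (sc : PySem.Dict String Int)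
    (hitems : sc.items = pvQual n pvCats) :
    (match PySem.List.max? sc.keys (fun c => sc.getD c 0) with
     | some c => c
     | none => "Gamer")
    = (match (pvQual n pvCats).foldl pvStepM none with
       | some b => b.1
       | none => "Gamer") := by
  have hkeys : sc.keys = (pvQual n pvCats).map (fun p => p.1) := by
    simp [PySem.Dict.keys, hitems]
  have hqnodup : ((pvQual n pvCats).map (fun p => p.1)).Nodup :=
    (pvQualSublist n pvCats).nodup (by decide)
  have hknodup : sc.keys.Nodup := hkeys ▸ hqnodup
  have hq : ∀ p ∈ pvQual n pvCats, sc.getD p.1 0 = p.2 := by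
    intro p hp
    obtain ⟨c, s⟩ := p
    have hmem : (c, s) ∈ sc.items := hitems ▸ hp
    have hget := PySem.Dict.get?_of_mem_items sc hmem hknodup
    simp [PySem.Dict.getD, hget]
  have hmax : PySem.List.max? sc.keys (fun c => sc.getD c 0)
      = ((pvQual n pvCats).foldl pvStepM none).map (fun p => p.1) := by
    rw [PySem.List.max?, hkeys, List.foldl_map]
    rw [← pvMaxFold (fun c => sc.getD c 0) (pvQual n pvCats) hq none
      (fun b hb => by simp at hb)]
    exact List.foldl_ext _ _ _ (fun a b _ => by cases a <;> rfl)
  rw [hmax]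
  cases (pvQual n pvCats).foldl pvStepM none <;> simp

lemma pvA_eq (n : String) :
    category n
    = (match (pvQual n pvCats).foldl pvStepM none with
       | some b => b.1
       | none => "Gamer") := by
  simp only [category]
  refine pvA_max n _ ?_
  have h := pvDictItems n pvCats PySem.Dict.empty
    (fun cpt _ => PySem.Dict.contains_empty cpt.1) (by decide)
  simpa [PySem.Dict.empty] using h

lemma pvB_eq (n : String) :
    category_alt n
    = (match (pvQual n pvCats).foldl pvStepM none with
       | some b => b.1
       | none => "Gamer") := by
  unfold category_alt
  simp only []
  have hB : pvCats.foldl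
      (fun acc cpt =>
        let s : Int := (((cpt.2.1.filter (fun p =>
          PySem.Set.contains (pvScan (pvCats.flatMap (fun cpt => cpt.2.1)) n.toList PySem.Set.empty) p)).length : Int))
        match acc with
        | none => if s ≥ cpt.2.2 then some (cpt.1, s) else none
        | some b => if s ≥ cpt.2.2 ∧ b.2 < s then some (cpt.1, s) else some b)
      none
      = (pvQual n pvCats).foldl pvStepM none := by
    refine Eq.trans (PySem.List.foldl_congr_mem _ _ _ _ ?_) (pvFoldB n pvCats none)
    intro acc cpt hmem
    have hs := pvScoreB n (pvScan (pvCats.flatMap (fun cpt => cpt.2.1)) n.toList PySem.Set.empty)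
      (fun p hp => pvScanContains n p hp) cpt hmem
    simp only []
    rw [hs]
  rw [hB]

-- ===== VERDICT =====
theorem category_spec : Claim_equal_category := by
  intro n _
  unfold Spec_category
  rw [pvA_eq, pvB_eq]
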